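-- pv_equiv track=rewrite | github.com/YuHaoLao/Data-Structure | DFS/ticket_to_ride.py | cal_point
-- ===== SOURCE A (Python) =====
-- def cal_point(track_List):
--     total_point=0
--     for i in range (len(track_List)):
--         if track_List[i]==1:
--             total_point+=1
--         if track_List[i]==2:
--             total_point+=2
--         if track_List[i]==3:
--             total_point+=4
--         if track_List[i]==4:
--             total_point+=7
--         if track_List[i]==5:
--             total_point+=10
--         if track_List[i]==6:
--             total_point+=15
--     return total_point
-- ===== SOURCE B (Python) =====
-- def cal_point(track_List):
--     counts = {}
--     for t in track_List:
--         counts[t] = counts.get(t, 0) + 1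
--     total = 0
--     for length, value in [(1, 1), (2, 2), (3, 4), (4, 7), (5, 10), (6, 15)]:
--         total += counts.get(length, 0) * value
--     return total
-- ===== Notes on version B (the rewrite author's own statement) =====
-- stated objective: alternative
-- what changed: B tabulates the list once into a dict of counts and then loops over the fixed six-entry point table adding count*value, instead of testing every element against six equality branches.
import Mathlib
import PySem

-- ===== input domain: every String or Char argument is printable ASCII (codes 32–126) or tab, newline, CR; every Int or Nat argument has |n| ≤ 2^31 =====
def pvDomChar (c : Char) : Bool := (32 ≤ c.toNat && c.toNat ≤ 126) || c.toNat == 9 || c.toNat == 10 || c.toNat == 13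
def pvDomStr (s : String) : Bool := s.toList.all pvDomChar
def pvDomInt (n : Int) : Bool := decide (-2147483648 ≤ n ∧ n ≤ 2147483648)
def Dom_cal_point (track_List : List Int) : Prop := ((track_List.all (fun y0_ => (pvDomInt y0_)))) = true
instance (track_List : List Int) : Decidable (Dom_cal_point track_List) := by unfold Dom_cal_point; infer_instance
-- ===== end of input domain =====

-- B builds a dict of counts in one pass and then sums count*value over the fixed
-- six-entry point table, instead of A's six equality tests on every element.

-- ===== PORT A =====
-- body of A's loop: six independent 'if' statements, each adding to total_point
def pvStepA (total_point x : Int) : Int :=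
  let total_point := if x == 1 then total_point + 1 else total_point
  let total_point := if x == 2 then total_point + 2 else total_point
  let total_point := if x == 3 then total_point + 4 else total_point
  let total_point := if x == 4 then total_point + 7 else total_point
  let total_point := if x == 5 then total_point + 10 else total_point
  let total_point := if x == 6 then total_point + 15 else total_point
  total_point

def cal_point (track_List : List Int) : Int :=
  (PySem.List.pyRange 0 (PySem.List.len track_List) 1).foldl
    (fun total_point i => pvStepA total_point (PySem.List.pyGetD track_List i 0)) 0

-- ===== PORT B =====
def cal_point_alt (track_List : List Int) : Int :=
  let counts : PySem.Dict Int Int :=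
    track_List.foldl (fun d t => d.insert t (d.getD t 0 + 1)) PySem.Dict.empty
  ([(1, 1), (2, 2), (3, 4), (4, 7), (5, 10), (6, 15)] : List (Int × Int)).foldl
    (fun total p => total + counts.getD p.1 0 * p.2) 0

-- ===== PRECONDITION & SPEC =====
def Spec_cal_point (track_List : List Int) (out : Int) : Prop := out = cal_point_alt track_List
instance (track_List : List Int) (out : Int) : Decidable (Spec_cal_point track_List out) := by unfold Spec_cal_point; infer_instance

-- ===== CLAIM (what is proved, stated in full; the proofs are below) =====
def Claim_equal_cal_point : Prop := ∀ (track_List : List Int), Dom_cal_point track_List → Spec_cal_point track_List (cal_point track_List)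

-- ===== LEMMAS AND PROOFS =====

-- A's loop accumulates the six weighted counts
theorem foldl_stepA (l : List Int) (acc : Int) :
    l.foldl pvStepA acc =
      acc + (l.count 1 : Int) * 1 + (l.count 2 : Int) * 2 + (l.count 3 : Int) * 4
          + (l.count 4 : Int) * 7 + (l.count 5 : Int) * 10 + (l.count 6 : Int) * 15 := by
  induction l generalizing acc with
  | nil => simp
  | cons x t ih =>
    simp only [List.foldl_cons, ih, List.count_cons]
    simp only [pvStepA]
    by_cases h1 : x = 1 <;> by_cases h2 : x = 2 <;> by_cases h3 : x = 3 <;>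
      by_cases h4 : x = 4 <;> by_cases h5 : x = 5 <;> by_cases h6 : x = 6 <;>
      simp [h1, h2, h3, h4, h5, h6] <;> ring

-- ===== VERDICT (by name: the statement is the Claim_ definition above) =====
theorem cal_point_spec : Claim_equal_cal_point := by
  intro l _
  unfold Spec_cal_point cal_point cal_point_alt
  rw [PySem.List.foldl_pyRange_zero_pyGetD l 0 pvStepA 0, foldl_stepA]
  simp [PySem.Dict.getD_foldl_insert_add_one]
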